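-- pv_equiv track=rewrite | github.com/dangun/adventofcode2020 | 08/8-2.py | execute
-- ===== SOURCE A (Python) =====
-- OP = 0
--
-- ARG = 1
--
-- def execute(ins_list, change):
--     exhausted = set()
--     acc = 0
--     i = 0
--     while i < len(ins_list):
--         if i in exhausted:
--             break
--         exhausted.add(i)
--         if ins_list[i][OP] == 'nop':
--             if i == change: # Do a jmp instead
--                 i += int(ins_list[i][ARG])
--             else:
--                 i += 1
--         elif ins_list[i][OP] == 'jmp':
--             if i == change: # Do a nop instead
--                 i += 1
--             else:
--                 i += int(ins_list[i][ARG])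
--         elif ins_list[i][OP] == 'acc':
--             acc += int(ins_list[i][ARG])
--             i += 1
--     return (i, acc)
-- ===== SOURCE B (Python) =====
-- OP = 0
--
-- ARG = 1
--
-- def execute(ins_list, change):
--     # Rho-style cycle detection instead of a visited set: the pc sequence is a deterministic
--     # orbit i -> step(i); it either escapes [0, n) or enters a cycle. Find the cycle length
--     # and its entry with lockstep pointers, then replay exactly mu+lam steps with the
--     # accumulator -- the pc then sits where the set-based simulator first revisits an index.
--     n = len(ins_list)
--
--     def step(i):
--         ins = ins_list[i]
--         op = ins[OP]
--         if op == 'nop':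
--             return i + int(ins[ARG]) if i == change else i + 1
--         if op == 'jmp':
--             return i + 1 if i == change else i + int(ins[ARG])
--         if op == 'acc':
--             return i + 1
--         return i
--
--     def delta(i):
--         ins = ins_list[i]
--         return int(ins[ARG]) if ins[OP] == 'acc' else 0
--
--     # Phase 1: walk n steps; if the orbit ever leaves [0, n), that is the answer.
--     i = 0
--     acc = 0
--     for _ in range(n):
--         if not (0 <= i < n):
--             return (i, acc)
--         acc += delta(i)
--         i = step(i)
--     if not (0 <= i < n):
--         return (i, acc)
--
--     # No escape: the orbit is eventually periodic and i (= x_n) lies on the cycle.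
--     e = i
--     # Phase 2: cycle length lam = least l >= 1 with step^l(e) == e.
--     lam = 1
--     j = step(e)
--     while j != e:
--         j = step(j)
--         lam += 1
--     # Phase 3: cycle entry mu = least m with x_m == x_{m+lam} (lockstep pointers).
--     p = 0
--     q = 0
--     for _ in range(lam):
--         q = step(q)
--     mu = 0
--     while p != q:
--         p = step(p)
--         q = step(q)
--         mu += 1
--     # Phase 4: replay mu+lam steps with the accumulator.
--     i = 0
--     acc = 0
--     for _ in range(mu + lam):
--         acc += delta(i)
--         i = step(i)
--     return (i, acc)
-- ===== Notes on version B (the rewrite author's own statement) =====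
-- stated objective: alternative
-- what changed: B replaces A's visited-set simulation by rho-style cycle detection on the deterministic pc orbit: walk n steps to rule out escape and land on the cycle, find the cycle length and its entry with lockstep pointers, then replay exactly mu+lam steps with the accumulator; no set is maintained at all (O(1) extra memory).
-- outside the precondition, e.g. on execute([['jmp', '-1'], ['acc', '5']], 9): A returns (0, 5), B returns (-1, 0); on execute([['acc', 'q']], -1): A raises ValueError, B raises ValueError; on execute([[]], 0): A raises IndexError, B raises IndexError
import Mathlib
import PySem

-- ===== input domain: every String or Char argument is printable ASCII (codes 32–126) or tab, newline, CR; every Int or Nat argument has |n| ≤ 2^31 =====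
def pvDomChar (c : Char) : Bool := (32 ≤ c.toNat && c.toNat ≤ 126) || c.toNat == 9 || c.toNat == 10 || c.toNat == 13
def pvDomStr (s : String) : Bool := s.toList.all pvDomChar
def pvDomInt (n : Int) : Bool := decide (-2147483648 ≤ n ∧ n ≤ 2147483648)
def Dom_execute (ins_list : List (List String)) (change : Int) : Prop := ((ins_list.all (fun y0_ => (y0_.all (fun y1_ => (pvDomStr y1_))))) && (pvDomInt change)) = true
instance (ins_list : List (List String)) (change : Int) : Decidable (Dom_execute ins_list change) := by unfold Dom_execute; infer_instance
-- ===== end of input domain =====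

-- B replaces A's visited-set simulation by rho-style cycle detection on the deterministic pc
-- orbit (walk n steps to rule out escape, find the cycle length and entry with lockstep
-- pointers, replay mu+lam steps); same time cost, O(1) extra memory (objective: alternative).

-- ===== PORT A =====
-- the while loop of A; fuel only makes the recursion structural (never exhausted on Pre_ inputs)
def executeLoop (ins_list : List (List String)) (change : Int) :
    Nat → PySem.Set Int → Int → Int → Int × Int
  | 0, _, acc, i => (i, acc)
  | fuel + 1, exhausted, acc, i =>
    if i < (ins_list.length : Int) then
      if PySem.Set.contains exhausted i then (i, acc)   -- break
      else
        let exhausted := PySem.Set.add exhausted i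
        match PySem.List.pyGet? ins_list i with
        | none => (i, acc)        -- IndexError in Python; excluded by Pre_
        | some ins =>
          match PySem.List.pyGet? ins 0 with
          | none => (i, acc)      -- IndexError; excluded by Pre_
          | some op =>
            if op = "nop" then
              if i = change then       -- do a jmp instead
                match PySem.List.pyGet? ins 1 with
                | none => (i, acc)      -- IndexError; excluded by Pre_
                | some s =>
                  match PySem.Int.ofStr? s with
                  | none => (i, acc)    -- ValueError; excluded by Pre_
                  | some a => executeLoop ins_list change fuel exhausted acc (i + a)
              else executeLoop ins_list change fuel exhausted acc (i + 1)
            else if op = "jmp" then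
              if i = change then       -- do a nop instead
                executeLoop ins_list change fuel exhausted acc (i + 1)
              else
                match PySem.List.pyGet? ins 1 with
                | none => (i, acc)
                | some s =>
                  match PySem.Int.ofStr? s with
                  | none => (i, acc)
                  | some a => executeLoop ins_list change fuel exhausted acc (i + a)
            else if op = "acc" then
              match PySem.List.pyGet? ins 1 with
              | none => (i, acc)
              | some s =>
                match PySem.Int.ofStr? s with
                | none => (i, acc)
                | some a => executeLoop ins_list change fuel exhausted (acc + a) (i + 1)
            else executeLoop ins_list change fuel exhausted acc i
    else (i, acc)

def execute (ins_list : List (List String)) (change : Int) : Int × Int :=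
  executeLoop ins_list change (2 * ins_list.length + 2) PySem.Set.empty 0 0

-- ===== PORT B =====
-- B's helper `step(i)`: the next pc; none = IndexError/ValueError in Python (excluded by Pre_)
def bStep (ins_list : List (List String)) (change : Int) (i : Int) : Option Int :=
  match PySem.List.pyGet? ins_list i with
  | none => none
  | some ins =>
    match PySem.List.pyGet? ins 0 with
    | none => none
    | some op =>
      if op = "nop" then
        if i = change then
          match PySem.List.pyGet? ins 1 with
          | none => none
          | some s =>
            match PySem.Int.ofStr? s with
            | none => none
            | some a => some (i + a)
        else some (i + 1)
      else if op = "jmp" then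
        if i = change then some (i + 1)
        else
          match PySem.List.pyGet? ins 1 with
          | none => none
          | some s =>
            match PySem.Int.ofStr? s with
            | none => none
            | some a => some (i + a)
      else if op = "acc" then some (i + 1)
      else some i

-- B's helper `delta(i)`: the accumulator contribution of instruction i
def bDelta (ins_list : List (List String)) (change : Int) (i : Int) : Option Int :=
  match PySem.List.pyGet? ins_list i with
  | none => none
  | some ins =>
    match PySem.List.pyGet? ins 0 with
    | none => none
    | some op =>
      if op = "acc" then
        match PySem.List.pyGet? ins 1 with
        | none => none
        | some s =>
          match PySem.Int.ofStr? s with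
          | none => none
          | some a => some a
      else some 0

-- phase 1: `for _ in range(n)` walking the orbit, early .inl return on escape;
-- .inr = loop completed in range (then a final range check happens in execute_alt)
def runEsc (ins_list : List (List String)) (change : Int) :
    Nat → Int → Int → (Int × Int) ⊕ Int
  | 0, i, acc => if ¬ (0 ≤ i ∧ i < (ins_list.length : Int)) then .inl (i, acc) else .inr i
  | k + 1, i, acc =>
    if ¬ (0 ≤ i ∧ i < (ins_list.length : Int)) then .inl (i, acc)
    else
      match bDelta ins_list change i with
      | none => .inl (i, acc)       -- Python raises; excluded by Pre_
      | some d =>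
        match bStep ins_list change i with
        | none => .inl (i, acc)     -- Python raises; excluded by Pre_
        | some s => runEsc ins_list change k s (acc + d)

-- phase 2 while loop: cycle length (fuel never exhausted on Pre_ inputs)
def findLam (ins_list : List (List String)) (change : Int) (e : Int) :
    Nat → Int → Nat → Option Nat
  | 0, _, _ => none
  | fuel + 1, j, l =>
    if j = e then some l
    else
      match bStep ins_list change j with
      | none => none
      | some j' => findLam ins_list change e fuel j' (l + 1)

-- `for _ in range(k): q = step(q)`
def advance (ins_list : List (List String)) (change : Int) :
    Nat → Int → Option Int
  | 0, i => some i
  | k + 1, i =>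
    match bStep ins_list change i with
    | none => none
    | some s => advance ins_list change k s

-- phase 3 while loop: lockstep pointers to the cycle entry
def findMu (ins_list : List (List String)) (change : Int) :
    Nat → Int → Int → Nat → Option Nat
  | 0, _, _, _ => none
  | fuel + 1, p, q, m =>
    if p = q then some m
    else
      match bStep ins_list change p with
      | none => none
      | some p' =>
        match bStep ins_list change q with
        | none => none
        | some q' => findMu ins_list change fuel p' q' (m + 1)

-- phase 4: replay k steps with the accumulator
def walkAcc (ins_list : List (List String)) (change : Int) :
    Nat → Int → Int → Option (Int × Int)
  | 0, i, acc => some (i, acc)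
  | k + 1, i, acc =>
    match bDelta ins_list change i with
    | none => none
    | some d =>
      match bStep ins_list change i with
      | none => none
      | some s => walkAcc ins_list change k s (acc + d)

def execute_alt (ins_list : List (List String)) (change : Int) : Int × Int :=
  match runEsc ins_list change ins_list.length 0 0 with
  | .inl r => r
  | .inr e =>
    match bStep ins_list change e with
    | none => (0, 0)                -- Python raises; excluded by Pre_
    | some j0 =>
      match findLam ins_list change e (ins_list.length + 1) j0 1 with
      | none => (0, 0)              -- Python while loop never exits; excluded by Pre_
      | some lam =>
        match advance ins_list change lam 0 with
        | none => (0, 0)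
        | some q0 =>
          match findMu ins_list change (ins_list.length + 1) 0 q0 0 with
          | none => (0, 0)
          | some mu =>
            match walkAcc ins_list change (mu + lam) 0 0 with
            | none => (0, 0)
            | some r => r

-- ===== PRECONDITION & SPEC =====
-- does this instruction's argument get parsed (by either program, at pc k)?
def needsArg (op : String) (k : Nat) (change : Int) : Bool :=
  op == "acc" || (op == "jmp" && (k : Int) != change) || (op == "nop" && (k : Int) == change)

def insOk (change : Int) (k : Nat) (l : List String) : Bool :=
  !l.isEmpty &&
    (!needsArg (l.headD "") k change ||
      (decide (2 ≤ l.length) && (PySem.Int.ofStr? (l.getD 1 "")).isSome &&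
        (l.headD "" == "acc" || decide (0 ≤ (k : Int) + (PySem.Int.ofStr? (l.getD 1 "")).getD 0))))

-- Pre_ excludes (a) programs with an empty or unparseable instruction ANYWHERE (if either
-- program reaches one it raises IndexError/ValueError; reachability is not closed-form, so we
-- require it everywhere), and (b) programs in which a taken jump (jmp off `change`, or nop at
-- `change`) targets a negative pc: there A keeps running via Python's accidental negative-index
-- wraparound while comparing the raw negative pc against `change`, a corner nobody would
-- specify and on which A's and B's continuations are both accidental (B treats it as exit).
def Pre_execute (ins_list : List (List String)) (change : Int) : Prop :=
  ∀ k, (hk : k < ins_list.length) → insOk change k (ins_list[k]'hk) = true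

instance (ins_list : List (List String)) (change : Int) : Decidable (Pre_execute ins_list change) := by
  unfold Pre_execute; infer_instance

def pvWitness_execute : List (List String) × Int := ([["acc", "1"], ["jmp", "-2"]], 1)

def Spec_execute (ins_list : List (List String)) (change : Int) (out : Int × Int) : Prop := out = execute_alt ins_list change
instance (ins_list : List (List String)) (change : Int) (out : Int × Int) : Decidable (Spec_execute ins_list change out) := by unfold Spec_execute; infer_instance

-- ===== CLAIM (what is proved, stated in full; the proofs are below) =====
def Claim_equal_execute : Prop := ∀ (ins_list : List (List String)) (change : Int), Dom_execute ins_list change → Pre_execute ins_list change → Spec_execute ins_list change (execute ins_list change)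

-- ===== LEMMAS AND PROOFS =====

-- total proxies for B's step/delta, and the pc orbit x and accumulator prefix sums accS
def gS (L : List (List String)) (c : Int) (i : Int) : Int := (bStep L c i).getD i
def dS (L : List (List String)) (c : Int) (i : Int) : Int := (bDelta L c i).getD 0

def xO (L : List (List String)) (c : Int) : Nat → Int
  | 0 => 0
  | k + 1 => gS L c (xO L c k)

def accS (L : List (List String)) (c : Int) : Nat → Int
  | 0 => 0
  | k + 1 => accS L c k + dS L c (xO L c k)

def InR (L : List (List String)) (i : Int) : Prop := 0 ≤ i ∧ i < (L.length : Int)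

-- the loop-exit condition of A at orbit position k, as a Bool (for Nat.find)
def stopB (L : List (List String)) (c : Int) (k : Nat) : Bool :=
  !(decide (0 ≤ xO L c k) && decide (xO L c k < (L.length : Int))) ||
    (List.range k).any (fun j => decide (xO L c j = xO L c k))

theorem stopB_false {L : List (List String)} {c : Int} {k : Nat} (h : stopB L c k = false) :
    InR L (xO L c k) ∧ ∀ j < k, xO L c j ≠ xO L c k := by
  unfold stopB at h
  simp only [Bool.or_eq_false_iff, Bool.not_eq_false', Bool.and_eq_true, decide_eq_true_eq,
    List.any_eq_false, List.mem_range, decide_eq_false_iff_not] at h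
  exact ⟨⟨h.1.1, h.1.2⟩, h.2⟩

theorem stopB_true {L : List (List String)} {c : Int} {k : Nat} (h : stopB L c k = true) :
    ¬ InR L (xO L c k) ∨ ∃ j < k, xO L c j = xO L c k := by
  unfold stopB at h
  simp only [Bool.or_eq_true, Bool.not_eq_true', Bool.and_eq_false_iff, decide_eq_false_iff_not,
    List.any_eq_true, List.mem_range, decide_eq_true_eq] at h
  rcases h with h | h
  · exact Or.inl (fun hr => by rcases h with h | h; exact h hr.1; exact h hr.2)
  · exact Or.inr h

-- reads the argument string of an instruction with at least two fields
theorem pyGet?_one_cons_cons {a b : String} {r : List String} :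
    PySem.List.pyGet? (a :: b :: r) 1 = some b := by
  simp [PySem.List.pyGet?, PySem.List.pyIdx?]

-- B's step/delta succeed on in-range pcs and step stays nonnegative
theorem step_some {L : List (List String)} {c : Int} (hpre : Pre_execute L c) {i : Int}
    (hi : InR L i) : bStep L c i = some (gS L c i) ∧ 0 ≤ gS L c i := by
  obtain ⟨hi0, hin⟩ := hi
  have hklt : i.toNat < L.length := by omega
  have hins := hpre i.toNat hklt
  have hcast : ((i.toNat : Nat) : Int) = i := Int.toNat_of_nonneg hi0
  have hget : PySem.List.pyGet? L i = some (L[i.toNat]'hklt) :=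
    PySem.List.pyGet?_eq_some_getElem L hi0 hin
  cases hl : L[i.toNat]'hklt with
  | nil => rw [hl] at hins; simp [insOk] at hins
  | cons op rest =>
    rw [hl] at hins hget
    simp only [insOk, needsArg, hcast, List.headD_cons, List.isEmpty_cons, Bool.not_false,
      Bool.true_and, Bool.or_eq_true, Bool.not_eq_true', Bool.and_eq_true, beq_iff_eq,
      decide_eq_true_eq] at hins
    simp only [bStep, gS, hget, PySem.List.pyGet?_zero_cons]
    by_cases hn : op = "nop"
    · by_cases hic : i = c
      · have harg : 2 ≤ (op :: rest).length ∧
            (PySem.Int.ofStr? ((op :: rest).getD 1 "")).isSome = true ∧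
            (op = "acc" ∨ 0 ≤ i + (PySem.Int.ofStr? ((op :: rest).getD 1 "")).getD 0) := by
          rcases hins with h | h
          · exact absurd h (by simp [hn, hic])
          · exact ⟨h.1.1, h.1.2, h.2⟩
        cases rest with
        | nil => simp at harg
        | cons s rest2 =>
          have hs : (op :: s :: rest2).getD 1 "" = s := rfl
          rw [hs] at harg
          obtain ⟨a, ha⟩ := Option.isSome_iff_exists.mp harg.2.1
          have hbound : 0 ≤ i + a := by
            rcases harg.2.2 with h | h
            · exact absurd h (by simp [hn])
            · rwa [ha, Option.getD_some] at h
          simp [hn, hic, pyGet?_one_cons_cons, ha]; omega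
      · simp [hn, hic]; omega
    · by_cases hj : op = "jmp"
      · by_cases hic : i = c
        · simp [hn, hj, hic]; omega
        · have harg : 2 ≤ (op :: rest).length ∧
              (PySem.Int.ofStr? ((op :: rest).getD 1 "")).isSome = true ∧
              (op = "acc" ∨ 0 ≤ i + (PySem.Int.ofStr? ((op :: rest).getD 1 "")).getD 0) := by
            rcases hins with h | h
            · exact absurd h (by simp [hj, hic])
            · exact ⟨h.1.1, h.1.2, h.2⟩
          cases rest with
          | nil => simp at harg
          | cons s rest2 =>
            have hs : (op :: s :: rest2).getD 1 "" = s := rfl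
            rw [hs] at harg
            obtain ⟨a, ha⟩ := Option.isSome_iff_exists.mp harg.2.1
            have hbound : 0 ≤ i + a := by
              rcases harg.2.2 with h | h
              · exact absurd h (by simp [hj])
              · rwa [ha, Option.getD_some] at h
            simp [hn, hj, hic, pyGet?_one_cons_cons, ha, hbound]
      · by_cases hacc : op = "acc"
        · simp [hn, hj, hacc]; omega
        · simp [hn, hj, hacc]; omega

theorem delta_some {L : List (List String)} {c : Int} (hpre : Pre_execute L c) {i : Int}
    (hi : InR L i) : bDelta L c i = some (dS L c i) := by
  obtain ⟨hi0, hin⟩ := hi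
  have hklt : i.toNat < L.length := by omega
  have hins := hpre i.toNat hklt
  have hcast : ((i.toNat : Nat) : Int) = i := Int.toNat_of_nonneg hi0
  have hget : PySem.List.pyGet? L i = some (L[i.toNat]'hklt) :=
    PySem.List.pyGet?_eq_some_getElem L hi0 hin
  cases hl : L[i.toNat]'hklt with
  | nil => rw [hl] at hins; simp [insOk] at hins
  | cons op rest =>
    rw [hl] at hins hget
    simp only [insOk, needsArg, hcast, List.headD_cons, List.isEmpty_cons, Bool.not_false,
      Bool.true_and, Bool.or_eq_true, Bool.not_eq_true', Bool.and_eq_true, beq_iff_eq,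
      decide_eq_true_eq] at hins
    simp only [bDelta, dS, hget, PySem.List.pyGet?_zero_cons]
    by_cases hacc : op = "acc"
    · have harg : 2 ≤ (op :: rest).length ∧
          (PySem.Int.ofStr? ((op :: rest).getD 1 "")).isSome = true := by
        rcases hins with h | h
        · exact absurd h (by simp [hacc])
        · exact ⟨h.1.1, h.1.2⟩
      cases rest with
      | nil => simp at harg
      | cons s rest2 =>
        have hs : (op :: s :: rest2).getD 1 "" = s := rfl
        rw [hs] at harg
        obtain ⟨a, ha⟩ := Option.isSome_iff_exists.mp harg.2
        simp [hacc, pyGet?_one_cons_cons, ha]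
    · simp [hacc]

-- a stopping point exists within the first n+1 orbit positions (pigeonhole)
theorem exists_stop (L : List (List String)) (c : Int) (hpre : Pre_execute L c) :
    ∃ k, k ≤ L.length ∧ stopB L c k = true := by
  by_contra h
  push_neg at h
  have hf : ∀ k ≤ L.length, stopB L c k = false := by
    intro k hk
    have := h k hk
    simpa using this
  have hmaps : ∀ k ∈ Finset.range (L.length + 1),
      xO L c k ∈ Finset.Ico (0 : Int) (L.length : Int) := by
    intro k hk
    have := (stopB_false (hf k (by simpa using Nat.lt_succ_iff.mp (Finset.mem_range.mp hk)))).1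
    simpa [Finset.mem_Ico] using this
  have hinj : Set.InjOn (fun k => xO L c k) (Finset.range (L.length + 1)) := by
    intro a ha b hb heq
    simp only [Finset.coe_range, Set.mem_Iio] at ha hb
    rcases lt_trichotomy a b with hab | hab | hab
    · exact absurd heq ((stopB_false (hf b (by omega))).2 a hab)
    · exact hab
    · exact absurd heq.symm ((stopB_false (hf a (by omega))).2 b hab)
  have hcard := Finset.card_le_card_of_injOn (fun k => xO L c k) hmaps hinj
  rw [Finset.card_range] at hcard
  have : (Finset.Ico (0 : Int) (L.length : Int)).card = L.length := by
    rw [Int.card_Ico]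
    omega
  omega

-- ===== A-side characterization =====
def seenK (L : List (List String)) (c : Int) (k : Nat) : PySem.Set Int :=
  (List.range k).foldl (fun s j => PySem.Set.add s (xO L c j)) PySem.Set.empty

theorem contains_add_iff (s : PySem.Set Int) (a b : Int) :
    PySem.Set.contains (PySem.Set.add s a) b = true ↔
      PySem.Set.contains s b = true ∨ b = a := by
  simp only [PySem.Set.add, PySem.Set.contains, decide_eq_true_eq]
  split_ifs with h
  · constructor
    · exact Or.inl
    · rintro (hb | rfl)
      · exact hb
      · exact h
  · simp [List.mem_append]

theorem seenK_contains (L : List (List String)) (c : Int) (k : Nat) (v : Int) :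
    PySem.Set.contains (seenK L c k) v = true ↔ ∃ j < k, xO L c j = v := by
  induction k with
  | zero => simp [seenK, PySem.Set.empty, PySem.Set.contains]
  | succ k ih =>
    have hstep : seenK L c (k + 1) = PySem.Set.add (seenK L c k) (xO L c k) := by
      unfold seenK
      rw [List.range_succ, List.foldl_append]
      rfl
    rw [hstep, contains_add_iff, ih]
    constructor
    · rintro (⟨j, hj, hx⟩ | hv)
      · exact ⟨j, by omega, hx⟩
      · exact ⟨k, by omega, hv.symm⟩
    · rintro ⟨j, hj, hx⟩
      rcases Nat.lt_succ_iff_lt_or_eq.mp hj with h | rfl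
      · exact Or.inl ⟨j, h, hx⟩
      · exact Or.inr hx.symm

theorem xO_nonneg {L : List (List String)} {c : Int} (hpre : Pre_execute L c) :
    ∀ k, (∀ j < k, InR L (xO L c j)) → 0 ≤ xO L c k := by
  intro k hk
  cases k with
  | zero => simp [xO]
  | succ k =>
    have hInR := hk k (by omega)
    have := (step_some hpre hInR).2
    simpa [xO] using this

-- one executed instruction of A advances the loop state exactly as B's step/delta do
theorem executeLoop_step {L : List (List String)} {c : Int} (hpre : Pre_execute L c) {i : Int}
    (hi : InR L i) (seen : PySem.Set Int) (hns : PySem.Set.contains seen i = false)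
    (acc : Int) (fuel : Nat) :
    executeLoop L c (fuel + 1) seen acc i =
      executeLoop L c fuel (PySem.Set.add seen i) (acc + dS L c i) (gS L c i) := by
  obtain ⟨hi0, hin⟩ := hi
  have hklt : i.toNat < L.length := by omega
  have hins := hpre i.toNat hklt
  have hcast : ((i.toNat : Nat) : Int) = i := Int.toNat_of_nonneg hi0
  have hget : PySem.List.pyGet? L i = some (L[i.toNat]'hklt) :=
    PySem.List.pyGet?_eq_some_getElem L hi0 hin
  cases hl : L[i.toNat]'hklt with
  | nil => rw [hl] at hins; simp [insOk] at hins
  | cons op rest =>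
    rw [hl] at hins hget
    simp only [insOk, needsArg, hcast, List.headD_cons, List.isEmpty_cons, Bool.not_false,
      Bool.true_and, Bool.or_eq_true, Bool.not_eq_true', Bool.and_eq_true, beq_iff_eq,
      decide_eq_true_eq] at hins
    rw [executeLoop, if_pos hin, if_neg (by simpa [PySem.Set.contains] using hns), hget]
    dsimp only
    rw [PySem.List.pyGet?_zero_cons]
    dsimp only
    by_cases hn : op = "nop"
    · by_cases hic : i = c
      · have harg : 2 ≤ (op :: rest).length ∧
            (PySem.Int.ofStr? ((op :: rest).getD 1 "")).isSome = true := by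
          rcases hins with h | h
          · exact absurd h (by simp [hn, hic])
          · exact ⟨h.1.1, h.1.2⟩
        cases rest with
        | nil => simp at harg
        | cons str rest2 =>
          have hs : (op :: str :: rest2).getD 1 "" = str := rfl
          rw [hs] at harg
          obtain ⟨a, ha⟩ := Option.isSome_iff_exists.mp harg.2
          have hg : gS L c i = i + a := by simp only [gS, bStep, hget, PySem.List.pyGet?_zero_cons]; simp [hn, hic, pyGet?_one_cons_cons, ha]
          have hd : dS L c i = 0 := by simp only [dS, bDelta, hget, PySem.List.pyGet?_zero_cons]; simp [hn]
          rw [if_pos hn, if_pos hic, pyGet?_one_cons_cons]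
          dsimp only
          rw [ha, hg, hd, add_zero]
      · have hg : gS L c i = i + 1 := by simp only [gS, bStep, hget, PySem.List.pyGet?_zero_cons]; simp [ hn, hic]
        have hd : dS L c i = 0 := by simp only [dS, bDelta, hget, PySem.List.pyGet?_zero_cons]; simp [ hn]
        rw [if_pos hn, if_neg hic, hg, hd, add_zero]
    · by_cases hj : op = "jmp"
      · by_cases hic : i = c
        · have hg : gS L c i = i + 1 := by simp only [gS, bStep, hget, PySem.List.pyGet?_zero_cons]; simp [ hn, hj, hic]
          have hd : dS L c i = 0 := by simp only [dS, bDelta, hget, PySem.List.pyGet?_zero_cons]; simp [ hj]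
          rw [if_neg hn, if_pos hj, if_pos hic, hg, hd, add_zero]
        · have harg : 2 ≤ (op :: rest).length ∧
              (PySem.Int.ofStr? ((op :: rest).getD 1 "")).isSome = true := by
            rcases hins with h | h
            · exact absurd h (by simp [hj, hic])
            · exact ⟨h.1.1, h.1.2⟩
          cases rest with
          | nil => simp at harg
          | cons str rest2 =>
            have hs : (op :: str :: rest2).getD 1 "" = str := rfl
            rw [hs] at harg
            obtain ⟨a, ha⟩ := Option.isSome_iff_exists.mp harg.2
            have hg : gS L c i = i + a := by simp only [gS, bStep, hget, PySem.List.pyGet?_zero_cons]; simp [hn, hj, hic, pyGet?_one_cons_cons, ha]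
            have hd : dS L c i = 0 := by simp only [dS, bDelta, hget, PySem.List.pyGet?_zero_cons]; simp [hj]
            rw [if_neg hn, if_pos hj, if_neg hic, pyGet?_one_cons_cons]
            dsimp only
            rw [ha, hg, hd, add_zero]
      · by_cases hacc : op = "acc"
        · have harg : 2 ≤ (op :: rest).length ∧
              (PySem.Int.ofStr? ((op :: rest).getD 1 "")).isSome = true := by
            rcases hins with h | h
            · exact absurd h (by simp [hacc])
            · exact ⟨h.1.1, h.1.2⟩
          cases rest with
          | nil => simp at harg
          | cons str rest2 =>
            have hs : (op :: str :: rest2).getD 1 "" = str := rfl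
            rw [hs] at harg
            obtain ⟨a, ha⟩ := Option.isSome_iff_exists.mp harg.2
            have hg : gS L c i = i + 1 := by simp only [gS, bStep, hget, PySem.List.pyGet?_zero_cons]; simp [hn, hj, hacc]
            have hd : dS L c i = a := by simp only [dS, bDelta, hget, PySem.List.pyGet?_zero_cons]; simp [hacc, pyGet?_one_cons_cons, ha]
            rw [if_neg hn, if_neg hj, if_pos hacc, pyGet?_one_cons_cons]
            dsimp only
            rw [ha, hg, hd]
        · have hg : gS L c i = i := by simp only [gS, bStep, hget, PySem.List.pyGet?_zero_cons]; simp [ hn, hj, hacc]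
          have hd : dS L c i = 0 := by simp only [dS, bDelta, hget, PySem.List.pyGet?_zero_cons]; simp [ hacc]
          rw [if_neg hn, if_neg hj, if_neg hacc, hg, hd, add_zero]

theorem executeLoop_eq (L : List (List String)) (c : Int) (hpre : Pre_execute L c)
    (K : Nat) (hK : stopB L c K = true) (hmin : ∀ j < K, stopB L c j = false) :
    ∀ k fuel, k ≤ K → K + 1 ≤ k + fuel →
      executeLoop L c fuel (seenK L c k) (accS L c k) (xO L c k) = (xO L c K, accS L c K) := by
  have hInRlt : ∀ j < K, InR L (xO L c j) := fun j hj => (stopB_false (hmin j hj)).1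
  intro k fuel hkK hfuel
  induction fuel generalizing k with
  | zero => omega
  | succ fuel ih =>
    rcases Nat.lt_or_ge k K with hlt | hge
    · -- one more step
      have hinfo := stopB_false (hmin k hlt)
      have hns : PySem.Set.contains (seenK L c k) (xO L c k) = false := by
        rw [Bool.eq_false_iff]
        intro hcon
        obtain ⟨j, hj, hx⟩ := (seenK_contains L c k (xO L c k)).mp hcon
        exact hinfo.2 j hj hx
      rw [executeLoop_step hpre hinfo.1 _ hns]
      have hseen : PySem.Set.add (seenK L c k) (xO L c k) = seenK L c (k + 1) := by
        unfold seenK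
        rw [List.range_succ, List.foldl_append]
        rfl
      rw [hseen]
      have hx1 : gS L c (xO L c k) = xO L c (k + 1) := rfl
      have ha1 : accS L c k + dS L c (xO L c k) = accS L c (k + 1) := rfl
      rw [hx1, ha1]
      exact ih (k + 1) (by omega) (by omega)
    · -- k = K: the loop stops here
      have hkK' : k = K := by omega
      subst hkK'
      have h0 : 0 ≤ xO L c k := xO_nonneg hpre k hInRlt
      rcases stopB_true hK with hout | hrep
      · have hge2 : (L.length : Int) ≤ xO L c k := by
          by_contra hcon
          exact hout ⟨h0, by omega⟩
        rw [executeLoop, if_neg (by omega)]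
      · obtain ⟨j, hj, hx⟩ := hrep
        have hInR : InR L (xO L c k) := hx ▸ hInRlt j hj
        have hcon : PySem.Set.contains (seenK L c k) (xO L c k) = true :=
          (seenK_contains L c k (xO L c k)).mpr ⟨j, hj, hx⟩
        rw [executeLoop, if_pos hInR.2, if_pos hcon]

-- ===== B-side characterization =====

-- phase 1, escaping case: the orbit leaves the program at step K
theorem runEsc_esc {L : List (List String)} {c : Int} (hpre : Pre_execute L c) {K : Nat}
    (hInRlt : ∀ j < K, InR L (xO L c j)) (hout : ¬ InR L (xO L c K)) :
    ∀ fuel k, k ≤ K → K ≤ k + fuel →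
      runEsc L c fuel (xO L c k) (accS L c k) = .inl (xO L c K, accS L c K) := by
  intro fuel
  induction fuel with
  | zero =>
    intro k hk1 hk2
    have hkK : k = K := by omega
    rw [hkK, runEsc, if_pos (show ¬ (0 ≤ xO L c K ∧ xO L c K < (L.length : Int)) from hout)]
  | succ fuel ih =>
    intro k hk1 hk2
    rcases Nat.lt_or_ge k K with hlt | hge
    · have hInR := hInRlt k hlt
      rw [runEsc, if_neg (not_not_intro (show (0 ≤ xO L c k ∧ xO L c k < (L.length : Int)) from hInR)),
        delta_some hpre hInR]
      dsimp only
      rw [(step_some hpre hInR).1]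
      dsimp only
      have hx1 : gS L c (xO L c k) = xO L c (k + 1) := rfl
      have ha1 : accS L c k + dS L c (xO L c k) = accS L c (k + 1) := rfl
      rw [hx1, ha1]
      exact ih (k + 1) (by omega) (by omega)
    · have hkK : k = K := by omega
      rw [hkK, runEsc, if_pos (show ¬ (0 ≤ xO L c K ∧ xO L c K < (L.length : Int)) from hout)]

-- phase 1, cycling case: the loop completes all its iterations in range
theorem runEsc_all {L : List (List String)} {c : Int} (hpre : Pre_execute L c)
    (hall : ∀ m, InR L (xO L c m)) :
    ∀ fuel k, runEsc L c fuel (xO L c k) (accS L c k) = .inr (xO L c (k + fuel)) := by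
  intro fuel
  induction fuel with
  | zero =>
    intro k
    rw [runEsc, if_neg (not_not_intro
      (show (0 ≤ xO L c k ∧ xO L c k < (L.length : Int)) from hall k))]
    rw [Nat.add_zero]
  | succ fuel ih =>
    intro k
    rw [runEsc, if_neg (not_not_intro
      (show (0 ≤ xO L c k ∧ xO L c k < (L.length : Int)) from hall k)), delta_some hpre (hall k)]
    dsimp only
    rw [(step_some hpre (hall k)).1]
    dsimp only
    have hx1 : gS L c (xO L c k) = xO L c (k + 1) := rfl
    have ha1 : accS L c k + dS L c (xO L c k) = accS L c (k + 1) := rfl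
    have he : k + (fuel + 1) = (k + 1) + fuel := by omega
    rw [hx1, ha1, he, ih (k + 1)]

theorem advance_eq {L : List (List String)} {c : Int} (hpre : Pre_execute L c)
    (hall : ∀ m, InR L (xO L c m)) :
    ∀ k m, advance L c k (xO L c m) = some (xO L c (m + k)) := by
  intro k
  induction k with
  | zero => intro m; rfl
  | succ k ih =>
    intro m
    rw [advance, (step_some hpre (hall m)).1]
    dsimp only
    have hx1 : gS L c (xO L c m) = xO L c (m + 1) := rfl
    have he : m + (k + 1) = (m + 1) + k := by omega
    rw [hx1, he, ih (m + 1)]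

theorem walkAcc_eq {L : List (List String)} {c : Int} (hpre : Pre_execute L c)
    (hall : ∀ m, InR L (xO L c m)) :
    ∀ k m, walkAcc L c k (xO L c m) (accS L c m) = some (xO L c (m + k), accS L c (m + k)) := by
  intro k
  induction k with
  | zero => intro m; rfl
  | succ k ih =>
    intro m
    rw [walkAcc, delta_some hpre (hall m)]
    dsimp only
    rw [(step_some hpre (hall m)).1]
    dsimp only
    have hx1 : gS L c (xO L c m) = xO L c (m + 1) := rfl
    have ha1 : accS L c m + dS L c (xO L c m) = accS L c (m + 1) := rfl
    have he : m + (k + 1) = (m + 1) + k := by omega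
    rw [hx1, ha1, he, ih (m + 1)]

theorem findLam_eq {L : List (List String)} {c : Int} (hpre : Pre_execute L c)
    (hall : ∀ m, InR L (xO L c m)) {lam : Nat} (hlam1 : 1 ≤ lam)
    (hlamAt : xO L c (L.length + lam) = xO L c L.length)
    (hleast : ∀ l, 1 ≤ l → l < lam → xO L c (L.length + l) ≠ xO L c L.length) :
    ∀ fuel l, 1 ≤ l → l ≤ lam → lam + 1 ≤ l + fuel →
      findLam L c (xO L c L.length) fuel (xO L c (L.length + l)) l = some lam := by
  intro fuel
  induction fuel with
  | zero => intro l _ _ _; omega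
  | succ fuel ih =>
    intro l hl1 hl2 hfuel
    rcases Nat.lt_or_ge l lam with hlt | hge
    · rw [findLam, if_neg (hleast l hl1 hlt), (step_some hpre (hall _)).1]
      dsimp only
      have hx : gS L c (xO L c (L.length + l)) = xO L c (L.length + (l + 1)) := by
        have he : L.length + (l + 1) = (L.length + l) + 1 := by omega
        rw [he]
        rfl
      rw [hx]
      exact ih (l + 1) (by omega) (by omega) (by omega)
    · have : l = lam := by omega
      subst this
      rw [findLam, if_pos hlamAt]

theorem findMu_eq {L : List (List String)} {c : Int} (hpre : Pre_execute L c)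
    (hall : ∀ m, InR L (xO L c m)) {mu lam : Nat}
    (hmuAt : xO L c (mu + lam) = xO L c mu)
    (hmuleast : ∀ m, m < mu → xO L c (m + lam) ≠ xO L c m) :
    ∀ fuel m, m ≤ mu → mu + 1 ≤ m + fuel →
      findMu L c fuel (xO L c m) (xO L c (m + lam)) m = some mu := by
  intro fuel
  induction fuel with
  | zero => intro m _ _; omega
  | succ fuel ih =>
    intro m hm1 hfuel
    rcases Nat.lt_or_ge m mu with hlt | hge
    · rw [findMu, if_neg (fun h => hmuleast m hlt h.symm), (step_some hpre (hall _)).1]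
      dsimp only
      rw [(step_some hpre (hall _)).1]
      dsimp only
      have hq : gS L c (xO L c (m + lam)) = xO L c ((m + 1) + lam) := by
        have he : (m + 1) + lam = (m + lam) + 1 := by omega
        rw [he]
        rfl
      rw [hq]
      exact ih (m + 1) (by omega) (by omega)
    · have : m = mu := by omega
      subst this
      rw [findMu, if_pos hmuAt.symm]

theorem execute_alt_eq (L : List (List String)) (c : Int) (hpre : Pre_execute L c)
    (K : Nat) (hKn : K ≤ L.length) (hK : stopB L c K = true) (hmin : ∀ j < K, stopB L c j = false) :
    execute_alt L c = (xO L c K, accS L c K) := by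
  have hInRlt : ∀ j < K, InR L (xO L c j) := fun j hj => (stopB_false (hmin j hj)).1
  rcases stopB_true hK with hout | hrep
  · -- escaping case: phase 1 returns
    have h1 := runEsc_esc hpre hInRlt hout L.length 0 (Nat.zero_le K) (by omega)
    unfold execute_alt
    rw [show runEsc L c L.length 0 0 = Sum.inl (xO L c K, accS L c K) from h1]
  · -- cycling case
    obtain ⟨mu, hmuK, hx⟩ := hrep
    have hmlK : mu + (K - mu) = K := by omega
    have hlam1 : 1 ≤ K - mu := by omega
    have hAt : xO L c (mu + (K - mu)) = xO L c mu := by rw [hmlK]; exact hx.symm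
    have hper : ∀ d, xO L c (mu + d + (K - mu)) = xO L c (mu + d) := by
      intro d
      induction d with
      | zero => simpa using hAt
      | succ d ih =>
        have e1 : mu + (d + 1) + (K - mu) = (mu + d + (K - mu)) + 1 := by omega
        have e2 : mu + (d + 1) = (mu + d) + 1 := by omega
        rw [e1, e2, show xO L c ((mu + d + (K - mu)) + 1) = gS L c (xO L c (mu + d + (K - mu))) from rfl, ih]
        rfl
    have hperGe : ∀ m, mu ≤ m → xO L c (m + (K - mu)) = xO L c m := by
      intro m hm
      have h2 := hper (m - mu)
      have e : mu + (m - mu) = m := by omega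
      rwa [e] at h2
    have hall : ∀ m, InR L (xO L c m) := by
      intro m
      induction m using Nat.strong_induction_on with
      | _ m ih =>
        rcases Nat.lt_or_ge m K with h | h
        · exact hInRlt m h
        · rcases Nat.eq_or_lt_of_le h with h' | h'
          · have hxm : xO L c m = xO L c mu := by rw [← h']; exact hx.symm
            rw [hxm]
            exact hInRlt mu hmuK
          · have e : (m - (K - mu)) + (K - mu) = m := by omega
            have h2 := hperGe (m - (K - mu)) (by omega)
            rw [e] at h2
            rw [h2]
            exact ih (m - (K - mu)) (by omega)
    have hposMod : ∀ m, mu ≤ m → xO L c m = xO L c (mu + (m - mu) % (K - mu)) := by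
      intro m
      induction m using Nat.strong_induction_on with
      | _ m ih =>
        intro hm
        rcases Nat.lt_or_ge (m - mu) (K - mu) with h | h
        · rw [Nat.mod_eq_of_lt h, show mu + (m - mu) = m from by omega]
        · have e : (m - (K - mu)) + (K - mu) = m := by omega
          have h2 := hperGe (m - (K - mu)) (by omega)
          rw [e] at h2
          rw [h2, ih (m - (K - mu)) (by omega) (by omega)]
          have e2 : m - (K - mu) - mu = (m - mu) - (K - mu) := by omega
          rw [e2, ← Nat.mod_eq_sub_mod h]
    have hcycD : ∀ d1 d2, d1 < d2 → d2 < K - mu → xO L c (mu + d1) ≠ xO L c (mu + d2) := by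
      intro d1 d2 h12 h2 heq
      exact (stopB_false (hmin (mu + d2) (by omega))).2 (mu + d1) (by omega) heq
    have hleast : ∀ l, 1 ≤ l → l < K - mu → xO L c (L.length + l) ≠ xO L c L.length := by
      intro l h1 hl heq
      have hn_mu : mu ≤ L.length := by omega
      have ha := hposMod L.length hn_mu
      have hb := hposMod (L.length + l) (by omega)
      have hA : (L.length - mu) % (K - mu) < K - mu := Nat.mod_lt _ (by omega)
      have hB : (L.length + l - mu) % (K - mu) < K - mu := Nat.mod_lt _ (by omega)
      have heq2 : xO L c (mu + (L.length + l - mu) % (K - mu)) =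
          xO L c (mu + (L.length - mu) % (K - mu)) := by rw [← ha, ← hb, heq]
      rcases lt_trichotomy ((L.length - mu) % (K - mu)) ((L.length + l - mu) % (K - mu))
        with h | h | h
      · exact hcycD _ _ h hB heq2.symm
      · have e : L.length + l - mu = (L.length - mu) + l := by omega
        rw [e] at h
        have hdvd := (Nat.modEq_iff_dvd' (Nat.le_add_right _ _)).mp h
        rw [Nat.add_sub_cancel_left] at hdvd
        have := Nat.le_of_dvd (by omega) hdvd
        omega
      · exact hcycD _ _ h hA heq2
    have hmuleast : ∀ m, m < mu → xO L c (m + (K - mu)) ≠ xO L c m := by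
      intro m hm heq
      exact (stopB_false (hmin (m + (K - mu)) (by omega))).2 m (by omega) heq.symm
    have hrun := runEsc_all hpre hall L.length 0
    rw [Nat.zero_add] at hrun
    have hlamAt : xO L c (L.length + (K - mu)) = xO L c L.length := hperGe L.length (by omega)
    have hfl := findLam_eq hpre hall hlam1 hlamAt hleast (L.length + 1) 1 le_rfl hlam1 (by omega)
    have hfm := findMu_eq hpre hall hAt hmuleast (L.length + 1) 0 (Nat.zero_le _) (by omega)
    have hadv := advance_eq hpre hall (K - mu) 0
    have hwa := walkAcc_eq hpre hall (mu + (K - mu)) 0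
    unfold execute_alt
    rw [show runEsc L c L.length 0 0 = Sum.inr (xO L c L.length) from hrun]
    dsimp only
    rw [(step_some hpre (hall L.length)).1]
    dsimp only
    rw [show gS L c (xO L c L.length) = xO L c (L.length + 1) from rfl, hfl]
    dsimp only
    rw [show advance L c (K - mu) 0 = some (xO L c (0 + (K - mu))) from hadv]
    dsimp only
    rw [show findMu L c (L.length + 1) 0 (xO L c (0 + (K - mu))) 0 = some mu from hfm]
    dsimp only
    rw [show walkAcc L c (mu + (K - mu)) 0 0 =
      some (xO L c (0 + (mu + (K - mu))), accS L c (0 + (mu + (K - mu)))) from hwa]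
    dsimp only
    rw [Nat.zero_add, hmlK]

-- ===== VERDICT (by name: the statement is the Claim_ definition above) =====
theorem execute_spec : Claim_equal_execute := by
  intro L c _ hpre
  unfold Spec_execute
  obtain ⟨k0, hk0n, hk0⟩ := exists_stop L c hpre
  have hex : ∃ k, stopB L c k = true := ⟨k0, hk0⟩
  set K := Nat.find hex with hKdef
  have hK : stopB L c K = true := Nat.find_spec hex
  have hmin : ∀ j < K, stopB L c j = false := by
    intro j hj
    have := Nat.find_min hex hj
    simpa using this
  have hKn : K ≤ L.length := le_trans (Nat.find_min' hex hk0) hk0n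
  rw [execute_alt_eq L c hpre K hKn hK hmin]
  unfold execute
  have := executeLoop_eq L c hpre K hK hmin 0 (2 * L.length + 2) (Nat.zero_le _) (by omega)
  simpa [seenK, accS, xO] using this
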